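-- pv_equiv track=rewrite | github.com/pypi-data/pypi-mirror-67 | packages/irekua-rest-api/irekua_rest_api-0.1.3-py3-none-any.whl/irekua_rest_api/tests/utils.py | create_permission_mapping_from_lists
-- ===== SOURCE A (Python) =====
-- class Users:
--     NON_AUTHENTICATED = 'non authenticated'
--     USER = 'user'
--     ADMIN = 'admin'
--     MODEL = 'model'
--     DEVELOPER = 'developer'
--     CURATOR = 'curator'
--     COLLECTION_USER = 'collection user'
--
--     ALL_USERS = [
--         NON_AUTHENTICATED,
--         USER,
--         ADMIN,
--         MODEL,
--         DEVELOPER,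
--         CURATOR,
--         COLLECTION_USER,
--     ]
--
--     ALL_AUTHENTICATED_USERS = [
--         USER,
--         ADMIN,
--         MODEL,
--         DEVELOPER,
--         CURATOR,
--         COLLECTION_USER,
--     ]
--
-- def create_permission_mapping_from_lists(permission_lists):
--     permission_mapping = {}
--
--     for action in permission_lists:
--         permission_mapping[action] = {}
--
--         permission_list = permission_lists[action]
--         for user_type in Users.ALL_USERS:
--             permission_mapping[action][user_type] = (
--                 user_type in permission_list)
--
--     return permission_mapping
-- ===== SOURCE B (Python) =====
-- class Users:
--     NON_AUTHENTICATED = 'non authenticated'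
--     USER = 'user'
--     ADMIN = 'admin'
--     MODEL = 'model'
--     DEVELOPER = 'developer'
--     CURATOR = 'curator'
--     COLLECTION_USER = 'collection user'
--
--     ALL_USERS = [
--         NON_AUTHENTICATED,
--         USER,
--         ADMIN,
--         MODEL,
--         DEVELOPER,
--         CURATOR,
--         COLLECTION_USER,
--     ]
--
--
-- def _grant_row(permission_list):
--     row = dict.fromkeys(Users.ALL_USERS, False)
--     for user_type in permission_list:
--         if user_type in row:
--             row[user_type] = True
--     return row
--
--
-- def create_permission_mapping_from_lists(permission_lists):
--     return {action: _grant_row(plist)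
--             for action, plist in permission_lists.items()}
-- ===== Notes on version B (the rewrite author's own statement) =====
-- stated objective: alternative
-- what changed: B is a dict comprehension over items that builds each inner row with a helper: every user type starts False (dict.fromkeys) and one mark pass over the granted list flips entries to True, replacing A's key lookup and per-user-type membership scan of the permission list.
import Mathlib
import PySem

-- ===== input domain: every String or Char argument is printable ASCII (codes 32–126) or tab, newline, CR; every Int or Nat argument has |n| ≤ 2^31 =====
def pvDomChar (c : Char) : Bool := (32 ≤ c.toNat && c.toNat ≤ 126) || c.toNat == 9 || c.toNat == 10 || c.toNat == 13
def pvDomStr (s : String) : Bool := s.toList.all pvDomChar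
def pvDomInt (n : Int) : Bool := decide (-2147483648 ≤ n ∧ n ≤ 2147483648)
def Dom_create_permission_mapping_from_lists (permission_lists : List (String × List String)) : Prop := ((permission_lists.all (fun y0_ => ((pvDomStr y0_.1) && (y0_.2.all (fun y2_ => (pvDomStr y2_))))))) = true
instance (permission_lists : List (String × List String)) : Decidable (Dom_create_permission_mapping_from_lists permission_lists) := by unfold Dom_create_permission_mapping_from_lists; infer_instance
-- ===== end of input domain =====

-- B is a comprehension over the dict's items whose helper builds each inner row by
-- initialising every user type to False and flipping granted entries to True in one mark
-- pass, instead of A's key lookup plus per-user-type membership scan (objective: alternative).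

def Users_ALL_USERS : List String :=
  ["non authenticated", "user", "admin", "model", "developer", "curator", "collection user"]

-- ===== PORT A =====
-- The Python parameter is a dict; the association list is read as one (PySem.Dict.ofList).
def create_permission_mapping_from_lists (permission_lists : List (String × List String)) : List (String × List (String × Bool)) :=
  let d : PySem.Dict String (List String) := PySem.Dict.ofList permission_lists
  let pm : PySem.Dict String (PySem.Dict String Bool) :=
    d.keys.foldl (fun pm action =>
      let pm := pm.insert action PySem.Dict.empty      -- permission_mapping[action] = {}
      let permission_list := d.getD action []           -- permission_lists[action] (key present)
      Users_ALL_USERS.foldl (fun pm user_type =>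
        pm.insert action ((pm.getD action PySem.Dict.empty).insert user_type
          (permission_list.contains user_type))) pm)    -- pm[action][user_type] = u in plist
      PySem.Dict.empty
  pm.items.map (fun p => (p.1, p.2.items))

-- ===== PORT B =====
-- _grant_row: the inner dict is kept as its items list (all 7 keys fixed up front), 'u in row'
-- is membership among its keys, and 'row[u] = True' overwrites that entry in place (exact,
-- since a Python dict assignment to an existing key keeps its position).
def grantRow (permission_list : List String) : List (String × Bool) :=
  permission_list.foldl
    (fun row user_type =>
      if row.any (fun entry => entry.1 == user_type)
      then row.map (fun entry => if entry.1 == user_type then (entry.1, true) else entry)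
      else row)
    (Users_ALL_USERS.map (fun user_type => (user_type, false)))

-- the dict comprehension over .items() (distinct keys, insertion order) is a map over items
def create_permission_mapping_from_lists_alt (permission_lists : List (String × List String)) : List (String × List (String × Bool)) :=
  (PySem.Dict.ofList permission_lists).items.map (fun p => (p.1, grantRow p.2))

-- ===== PRECONDITION & SPEC =====
def Spec_create_permission_mapping_from_lists (permission_lists : List (String × List String)) (out : List (String × List (String × Bool))) : Prop := out = create_permission_mapping_from_lists_alt permission_lists
instance (permission_lists : List (String × List String)) (out : List (String × List (String × Bool))) : Decidable (Spec_create_permission_mapping_from_lists permission_lists out) := by unfold Spec_create_permission_mapping_from_lists; infer_instance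

-- ===== CLAIM (what is proved, stated in full; the proofs are below) =====
def Claim_equal_create_permission_mapping_from_lists : Prop := ∀ (permission_lists : List (String × List String)), Dom_create_permission_mapping_from_lists permission_lists → Spec_create_permission_mapping_from_lists permission_lists (create_permission_mapping_from_lists permission_lists)

-- ===== LEMMAS AND PROOFS =====

-- A's inner loop: successive 'pm[action][user_type] = …' writes collapse to a single insert of
-- the inner dict built by the same inserts.
theorem innerA_collapse (us : List String) (g : String → Bool) (action : String)
    (pm : PySem.Dict String (PySem.Dict String Bool)) (d0 : PySem.Dict String Bool) :
    us.foldl (fun pm ut =>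
        pm.insert action ((pm.getD action PySem.Dict.empty).insert ut (g ut))) (pm.insert action d0)
      = pm.insert action (us.foldl (fun inner ut => inner.insert ut (g ut)) d0) := by
  induction us generalizing d0 with
  | nil => rfl
  | cons u rest ih =>
    simp only [List.foldl_cons, PySem.Dict.getD_insert_self, PySem.Dict.insert_insert_self]
    exact ih (d0.insert u (g u))

theorem outerA (d : PySem.Dict String (List String)) (ks : List String)
    (pm : PySem.Dict String (PySem.Dict String Bool)) :
    ks.foldl (fun pm action =>
        Users_ALL_USERS.foldl (fun pm user_type =>
          pm.insert action ((pm.getD action PySem.Dict.empty).insert user_type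
            ((d.getD action []).contains user_type))) (pm.insert action PySem.Dict.empty)) pm
      = ks.foldl (fun pm a =>
          pm.insert a (PySem.Dict.mk (Users_ALL_USERS.map (fun u => (u, (d.getD a []).contains u))))) pm := by
  induction ks generalizing pm with
  | nil => rfl
  | cons a rest ih =>
    simp only [List.foldl_cons]
    rw [innerA_collapse Users_ALL_USERS (fun ut => (d.getD a []).contains ut) a pm PySem.Dict.empty]
    exact ih _

-- B's mark pass over the granted list, from any all-user row.
theorem grant_fold (plist : List String) (f : String → Bool) :
    plist.foldl
      (fun row user_type =>
        if row.any (fun entry => entry.1 == user_type)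
        then row.map (fun entry => if entry.1 == user_type then (entry.1, true) else entry)
        else row)
      (Users_ALL_USERS.map (fun u => (u, f u)))
      = Users_ALL_USERS.map (fun u => (u, f u || plist.contains u)) := by
  induction plist generalizing f with
  | nil => simp
  | cons u rest ih =>
    simp only [List.foldl_cons, List.any_map]
    by_cases hc : Users_ALL_USERS.contains u
    · have hany : Users_ALL_USERS.any (fun v => v == u) = true := by
        simpa [List.contains_iff_mem, List.any_eq_true] using hc
      rw [if_pos (by simpa [Function.comp_def] using hany)]
      have hmap : (Users_ALL_USERS.map (fun v => (v, f v))).map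
          (fun entry => if entry.1 == u then (entry.1, true) else entry)
          = Users_ALL_USERS.map (fun v => (v, if v == u then true else f v)) := by
        rw [List.map_map]
        apply List.map_congr_left
        intro v _
        by_cases h : v = u <;> simp [h]
      rw [hmap, ih (fun v => if v == u then true else f v)]
      apply List.map_congr_left
      intro v hv
      by_cases h : v = u <;> simp [h]
    · have hany : Users_ALL_USERS.any (fun v => v == u) = false := by
        rw [List.any_eq_false]
        intro x hx
        simp only [beq_iff_eq]
        rintro rfl
        exact hc (by simpa [List.contains_iff_mem] using hx)
      rw [if_neg (by simp [Function.comp_def, hany])]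
      rw [ih]
      apply List.map_congr_left
      intro v hv
      have : ¬ (u = v) := by
        rintro rfl; exact hc (by simpa [List.contains_iff_mem] using hv)
      simp [Ne.symm this]

theorem grantRow_eq (plist : List String) :
    grantRow plist = Users_ALL_USERS.map (fun u => (u, plist.contains u)) := by
  unfold grantRow
  rw [grant_fold plist (fun _ => false)]
  simp

-- The common normal form both ports reach.
def pvCanon (permission_lists : List (String × List String)) : List (String × List (String × Bool)) :=
  (PySem.Dict.ofList permission_lists).items.map (fun p =>
    (p.1, Users_ALL_USERS.map (fun u => (u, p.2.contains u))))

theorem A_eq_canon (pl : List (String × List String)) :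
    create_permission_mapping_from_lists pl = pvCanon pl := by
  unfold create_permission_mapping_from_lists pvCanon
  simp only []
  rw [outerA]
  rw [PySem.Dict.items_foldl_insert_fresh (PySem.Dict.ofList pl).keys (fun a => a)
      (fun a => PySem.Dict.mk (Users_ALL_USERS.map (fun u => (u, ((PySem.Dict.ofList pl).getD a []).contains u))))
      PySem.Dict.empty (by intro a _; simp) (by simp [PySem.Dict.nodup_keys_ofList])]
  rw [PySem.Dict.items_eq_map_keys (PySem.Dict.ofList pl) (PySem.Dict.nodup_keys_ofList pl) []]
  simp [List.map_map, Function.comp_def, PySem.Dict.empty]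

theorem B_eq_canon (pl : List (String × List String)) :
    create_permission_mapping_from_lists_alt pl = pvCanon pl := by
  unfold create_permission_mapping_from_lists_alt pvCanon
  simp only [grantRow_eq]

-- ===== VERDICT (by name: the statement is the Claim_ definition above) =====
theorem create_permission_mapping_from_lists_spec : Claim_equal_create_permission_mapping_from_lists := by
  intro pl _
  unfold Spec_create_permission_mapping_from_lists
  rw [A_eq_canon, B_eq_canon]
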